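-- pv_equiv track=rewrite | github.com/S-JT/DATA-SCIENCE-EAST-AFRICA-BOOTCAMP-PROJECTS | WEEK 4 ASSIGNMENT.py | closest_key
-- ===== SOURCE A (Python) =====
-- def closest_key(drinks_dict,target_value):
--     closest_key = None
--     closest_index = float('inf')
--
--     for key, value_list in drinks_dict.items():
--         if target_value in value_list:
--             index = value_list.index(target_value)
--             if index < closest_index:
--                 closest_index = index
--                 closest_key = key
--
--     return closest_key
-- ===== SOURCE B (Python) =====
-- def closest_key(drinks_dict, target_value):
--     # Column-major search: scan index position 0 across all lists, then position 1, ...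
--     # The first list found holding target_value at the current position wins; since no
--     # earlier position matched any list, that position is that list's first occurrence
--     # and is globally minimal, with ties broken by dict order. Early-exits on a hit.
--     items = list(drinks_dict.items())
--     width = max((len(vl) for _, vl in items), default=0)
--     for j in range(width):
--         for key, vl in items:
--             if j < len(vl) and vl[j] == target_value:
--                 return key
--     return None
-- ===== Notes on version B (the rewrite author's own statement) =====
-- stated objective: alternative
-- what changed: Replaces A's single row-wise pass that tracks a running minimum first-occurrence index (via `in` + .index) by a column-major search: scan index position 0 across all lists, then position 1, etc., returning the first key whose list holds the target at the current position (early exit, no .index, no min tracking).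
import Mathlib
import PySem

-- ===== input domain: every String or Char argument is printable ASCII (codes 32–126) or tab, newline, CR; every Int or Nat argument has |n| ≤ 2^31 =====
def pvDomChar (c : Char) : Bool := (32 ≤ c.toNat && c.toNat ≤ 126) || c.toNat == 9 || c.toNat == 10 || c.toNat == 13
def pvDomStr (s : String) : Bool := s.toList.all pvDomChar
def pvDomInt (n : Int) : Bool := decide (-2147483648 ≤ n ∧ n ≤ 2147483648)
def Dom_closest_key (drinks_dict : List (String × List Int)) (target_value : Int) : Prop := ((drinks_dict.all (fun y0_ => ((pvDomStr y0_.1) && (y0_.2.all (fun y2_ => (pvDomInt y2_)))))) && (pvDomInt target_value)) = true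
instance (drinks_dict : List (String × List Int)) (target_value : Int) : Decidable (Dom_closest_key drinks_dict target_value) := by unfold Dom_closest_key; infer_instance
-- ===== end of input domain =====

-- B replaces A's row-wise running-minimum pass by a column-major search (first column position with a hit wins); same exact result.


-- ===== PORT A =====
-- one iteration of A's for-loop: state = (closest_key, closest_index) with none = float('inf')
def ckStepA (target_value : Int) (st : Option String × Option Nat) (kv : String × List Int) :
    Option String × Option Nat :=
  if target_value ∈ kv.2 then
    match PySem.List.index? kv.2 target_value with
    | none => st
    | some i =>
      match st.2 with
      | none => (some kv.1, some i)
      | some c => if i < c then (some kv.1, some i) else st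
  else st

def closest_key (drinks_dict : List (String × List Int)) (target_value : Int) : Option String :=
  (drinks_dict.foldl (ckStepA target_value) (none, none)).1

-- ===== PORT B =====
-- width = max((len(vl) for _, vl in items), default=0)
def ckWidth (drinks_dict : List (String × List Int)) : Nat :=
  drinks_dict.foldl (fun m kv => max m kv.2.length) 0

-- the inner for-loop with its early return: first key with j < len(vl) and vl[j] == target
-- ('j < len(vl) and vl[j] == t' is exactly 'vl[j]? = some t')
def ckFindCol (drinks_dict : List (String × List Int)) (target_value : Int) (j : Nat) :
    Option String :=
  (drinks_dict.find? (fun kv => kv.2[j]? == some target_value)).map Prod.fst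

-- the outer 'for j in range(width)' loop, j counting up, rem columns left
def ckLoop (drinks_dict : List (String × List Int)) (target_value : Int) :
    Nat → Nat → Option String
  | _, 0 => none
  | j, rem + 1 =>
    match ckFindCol drinks_dict target_value j with
    | some k => some k
    | none => ckLoop drinks_dict target_value (j + 1) rem

def closest_key_alt (drinks_dict : List (String × List Int)) (target_value : Int) : Option String :=
  ckLoop drinks_dict target_value 0 (ckWidth drinks_dict)

-- ===== PRECONDITION & SPEC =====
def Spec_closest_key (drinks_dict : List (String × List Int)) (target_value : Int) (out : Option String) : Prop := out = closest_key_alt drinks_dict target_value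
instance (drinks_dict : List (String × List Int)) (target_value : Int) (out : Option String) : Decidable (Spec_closest_key drinks_dict target_value out) := by unfold Spec_closest_key; infer_instance

-- ===== CLAIM (what is proved, stated in full; the proofs are below) =====
def Claim_equal_closest_key : Prop := ∀ (drinks_dict : List (String × List Int)) (target_value : Int), Dom_closest_key drinks_dict target_value → Spec_closest_key drinks_dict target_value (closest_key drinks_dict target_value)

-- ===== LEMMAS AND PROOFS =====

-- A's fold with the pair state, rewritten over a single optional (key, index) state
def ckStepB (target_value : Int) (acc : Option (String × Nat)) (kv : String × List Int) :
    Option (String × Nat) :=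
  match PySem.List.index? kv.2 target_value with
  | some i =>
    match acc with
    | none => some (kv.1, i)
    | some m => if i < m.2 then some (kv.1, i) else some m
  | none => acc

theorem ck_step_eq (target_value : Int) (acc : Option (String × Nat)) (kv : String × List Int) :
    ckStepA target_value (acc.map Prod.fst, acc.map Prod.snd) kv =
      ((ckStepB target_value acc kv).map Prod.fst, (ckStepB target_value acc kv).map Prod.snd) := by
  unfold ckStepA ckStepB
  by_cases hm : target_value ∈ kv.2
  · have hs : (PySem.List.index? kv.2 target_value).isSome := by
      rw [PySem.List.index?_isSome_iff]; exact hm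
    obtain ⟨i, hi⟩ := Option.isSome_iff_exists.mp hs
    rw [if_pos hm, hi]
    cases acc with
    | none => simp
    | some m =>
      simp only [Option.map_some]
      by_cases hlt : i < m.2 <;> simp [hlt]
  · have hn : PySem.List.index? kv.2 target_value = none := by
      rw [PySem.List.index?_eq_none_iff]; exact hm
    rw [if_neg hm, hn]

theorem ck_fold_eq (target_value : Int) (dd : List (String × List Int))
    (acc : Option (String × Nat)) :
    dd.foldl (ckStepA target_value) (acc.map Prod.fst, acc.map Prod.snd) =
      ((dd.foldl (ckStepB target_value) acc).map Prod.fst,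
       (dd.foldl (ckStepB target_value) acc).map Prod.snd) := by
  induction dd generalizing acc with
  | nil => rfl
  | cons kv t ih =>
    simp only [List.foldl_cons, ck_step_eq]
    exact ih (ckStepB target_value acc kv)

theorem ck_A_eq_fold (dd : List (String × List Int)) (t : Int) :
    closest_key dd t = (dd.foldl (ckStepB t) none).map Prod.fst := by
  unfold closest_key
  have := ck_fold_eq t dd none
  simp only [Option.map_none] at this
  rw [this]

-- if target occurs at position j then its first occurrence is at some i ≤ j
theorem ck_index_le (l : List Int) (t : Int) (j : Nat) (hj : l[j]? = some t) :
    ∃ i, PySem.List.index? l t = some i ∧ i ≤ j := by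
  have hmem : t ∈ l := by
    have hjl : j < l.length := (List.getElem?_eq_some_iff.mp hj).1
    exact List.mem_iff_getElem.mpr ⟨j, hjl, (List.getElem?_eq_some_iff.mp hj).2⟩
  have hsome : (PySem.List.index? l t).isSome := by
    rw [PySem.List.index?_isSome_iff]; exact hmem
  obtain ⟨i, hi⟩ := Option.isSome_iff_exists.mp hsome
  refine ⟨i, hi, ?_⟩
  obtain ⟨hk, _, hfirst⟩ := PySem.List.getElem_of_index?_eq_some hi
  by_contra hlt
  exact hfirst j (Nat.lt_of_not_le hlt) (List.getElem?_eq_some_iff.mp hj).2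

-- under 'all first occurrences ≥ j', column-j membership is exactly 'first occurrence = j'
theorem ck_col_iff (l : List Int) (t : Int) (j : Nat)
    (hinv : ∀ i, PySem.List.index? l t = some i → j ≤ i) :
    l[j]? = some t ↔ PySem.List.index? l t = some j := by
  constructor
  · intro h
    obtain ⟨i, hi, hle⟩ := ck_index_le l t j h
    have hji := hinv i hi
    have : i = j := Nat.le_antisymm hle hji
    rwa [this] at hi
  · intro h
    obtain ⟨hk, hv, _⟩ := PySem.List.getElem_of_index?_eq_some h
    exact List.getElem?_eq_some_iff.mpr ⟨hk, hv⟩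

-- where a some-result of one fold step can come from
theorem ck_step_src (t : Int) (acc : Option (String × Nat)) (kv : String × List Int)
    (m : String × Nat) (h : ckStepB t acc kv = some m) :
    acc = some m ∨ PySem.List.index? kv.2 t = some m.2 := by
  unfold ckStepB at h
  split at h
  · split at h
    · right
      injection h with h
      rw [← h]
      assumption
    · split at h
      · right
        injection h with h
        rw [← h]
        assumption
      · left; exact h
  · left; exact h

-- the fold keeps an accumulator whose index is ≤ every remaining first occurrence
theorem ck_fold_keep (t : Int) (dd : List (String × List Int)) (m : String × Nat)
    (h : ∀ kv ∈ dd, ∀ i, PySem.List.index? kv.2 t = some i → m.2 ≤ i) :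
    dd.foldl (ckStepB t) (some m) = some m := by
  induction dd with
  | nil => rfl
  | cons kv tl ih =>
    have step : ckStepB t (some m) kv = some m := by
      unfold ckStepB
      cases hidx : PySem.List.index? kv.2 t with
      | none => rfl
      | some i =>
        have := h kv (List.mem_cons_self) i hidx
        simp [Nat.not_lt.mpr this]
    rw [List.foldl_cons, step]
    exact ih (fun kv' hkv' => h kv' (List.mem_cons_of_mem _ hkv'))

-- any some-result of the fold is a candidate of the list (or the start accumulator)
theorem ck_fold_src (t : Int) :
    ∀ (dd : List (String × List Int)) (acc : Option (String × Nat)) (m : String × Nat),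
      dd.foldl (ckStepB t) acc = some m →
      acc = some m ∨ ∃ kv ∈ dd, PySem.List.index? kv.2 t = some m.2 := by
  intro dd
  induction dd with
  | nil => intro acc m h; exact Or.inl h
  | cons hd tl ih =>
    intro acc m h
    rw [List.foldl_cons] at h
    rcases ih _ m h with h' | ⟨kv', hkv', hi⟩
    · rcases ck_step_src t acc hd m h' with h2 | h2
      · exact Or.inl h2
      · exact Or.inr ⟨hd, List.mem_cons_self, h2⟩
    · exact Or.inr ⟨kv', List.mem_cons_of_mem _ hkv', hi⟩

-- if kv is the FIRST entry whose list has target at column j (all first occurrences ≥ j),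
-- the fold returns (kv.1, j)
theorem ck_fold_of_first (t : Int) (j : Nat) :
    ∀ (dd : List (String × List Int)) (acc : Option (String × Nat)) (kv : String × List Int),
      (∀ m, acc = some m → j < m.2) →
      (∀ kv' ∈ dd, ∀ i, PySem.List.index? kv'.2 t = some i → j ≤ i) →
      dd.find? (fun kv => kv.2[j]? == some t) = some kv →
      dd.foldl (ckStepB t) acc = some (kv.1, j) := by
  intro dd
  induction dd with
  | nil => intro acc kv _ _ hf; simp at hf
  | cons hd tl ih =>
    intro acc kv hacc hinv hf
    by_cases hp : hd.2[j]? = some t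
    · have hfind : (hd :: tl).find? (fun kv => kv.2[j]? == some t) = some hd := by
        rw [List.find?_cons_of_pos]; simp [hp]
      rw [hfind] at hf
      cases hf
      have hidx : PySem.List.index? hd.2 t = some j :=
        (ck_col_iff hd.2 t j (hinv hd List.mem_cons_self)).mp hp
      have step : ckStepB t acc hd = some (hd.1, j) := by
        unfold ckStepB
        rw [hidx]
        cases hacch : acc with
        | none => rfl
        | some m => simp [hacc m hacch]
      rw [List.foldl_cons, step]
      exact ck_fold_keep t tl (hd.1, j)
        (fun kv' hkv' => hinv kv' (List.mem_cons_of_mem _ hkv'))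
    · have hfind : (hd :: tl).find? (fun kv => kv.2[j]? == some t) =
          tl.find? (fun kv => kv.2[j]? == some t) := by
        rw [List.find?_cons_of_neg]; simp [hp]
      rw [hfind] at hf
      rw [List.foldl_cons]
      refine ih (ckStepB t acc hd) kv ?_
        (fun kv' hkv' => hinv kv' (List.mem_cons_of_mem _ hkv')) hf
      intro m hm
      rcases ck_step_src t acc hd m hm with h2 | h2
      · exact hacc m h2
      · have hle := hinv hd List.mem_cons_self m.2 h2
        rcases Nat.lt_or_ge j m.2 with h3 | h3
        · exact h3
        · exfalso
          have hmj : m.2 = j := Nat.le_antisymm h3 hle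
          rw [hmj] at h2
          exact hp ((ck_col_iff hd.2 t j (hinv hd List.mem_cons_self)).mpr h2)

-- the main loop invariant: B's column loop computes the key of A's fold result,
-- provided no first occurrence lies below j and the bound j+rem covers the result
theorem ck_loop_eq (t : Int) (dd : List (String × List Int)) :
    ∀ (rem j : Nat),
      (∀ kv ∈ dd, ∀ i, PySem.List.index? kv.2 t = some i → j ≤ i) →
      ckLoop dd t j rem =
        match dd.foldl (ckStepB t) none with
        | some m => if m.2 < j + rem then some m.1 else none
        | none => none := by
  intro rem
  induction rem with
  | zero =>
    intro j hinv
    cases hF : dd.foldl (ckStepB t) none with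
    | none => rfl
    | some m =>
      rcases ck_fold_src t dd none m hF with h | ⟨kv, hkv, hi⟩
      · exact absurd h (by simp)
      · have := hinv kv hkv m.2 hi
        simp [ckLoop, Nat.not_lt.mpr this]
  | succ rem ih =>
    intro j hinv
    show (match ckFindCol dd t j with
          | some k => some k
          | none => ckLoop dd t (j + 1) rem) = _
    cases hfc : ckFindCol dd t j with
    | some k =>
      obtain ⟨kv, hkv, hk⟩ := Option.map_eq_some_iff.mp hfc
      have hF := ck_fold_of_first t j dd none kv (by simp) hinv hkv
      rw [hF]
      have hb : j < j + (rem + 1) := by omega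
      simp [hb, hk]
    | none =>
      have hinv' : ∀ kv ∈ dd, ∀ i, PySem.List.index? kv.2 t = some i → j + 1 ≤ i := by
        intro kv hkv i hi
        have hij : j ≤ i := hinv kv hkv i hi
        rcases Nat.lt_or_ge j i with h' | h'
        · omega
        · exfalso
          have hij' : i = j := Nat.le_antisymm h' hij
          rw [hij'] at hi
          have hp : kv.2[j]? = some t := (ck_col_iff kv.2 t j (hinv kv hkv)).mpr hi
          have hne : dd.find? (fun kv => kv.2[j]? == some t) ≠ none := by
            intro hn
            have := List.find?_eq_none.mp hn kv hkv
            simp [hp] at this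
          unfold ckFindCol at hfc
          exact hne (Option.map_eq_none_iff.mp hfc)
      show ckLoop dd t (j + 1) rem = _
      rw [ih (j + 1) hinv']
      cases dd.foldl (ckStepB t) none with
      | none => rfl
      | some m =>
        have harith : j + 1 + rem = j + (rem + 1) := by omega
        simp only [harith]

-- every first occurrence is below the width
theorem ck_width_bound (dd : List (String × List Int)) (t : Int) (m : String × Nat)
    (h : dd.foldl (ckStepB t) none = some m) : m.2 < ckWidth dd := by
  rcases ck_fold_src t dd none m h with h' | ⟨kv, hkv, hi⟩
  · simp at h'
  · obtain ⟨hk, _, _⟩ := PySem.List.getElem_of_index?_eq_some hi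
    have hge : ∀ (l : List (String × List Int)) (a : Nat),
        a ≤ l.foldl (fun m kv => max m kv.2.length) a := by
      intro l
      induction l with
      | nil => intro a; exact le_refl _
      | cons hd tl ih =>
        intro a
        rw [List.foldl_cons]
        exact Nat.le_trans (Nat.le_max_left _ _) (ih _)
    have hmemle : ∀ (l : List (String × List Int)) (a : Nat), kv ∈ l →
        kv.2.length ≤ l.foldl (fun m kv => max m kv.2.length) a := by
      intro l
      induction l with
      | nil => intro a hmem; simp at hmem
      | cons hd tl ih =>
        intro a hmem
        rw [List.foldl_cons]
        rcases List.mem_cons.mp hmem with rfl | hmem'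
        · exact Nat.le_trans (Nat.le_max_right _ _) (hge tl _)
        · exact ih _ hmem'
    have hlen : kv.2.length ≤ ckWidth dd := hmemle dd 0 hkv
    omega

-- ===== VERDICT (by name: the statement is the Claim_ definition above) =====
theorem closest_key_spec : Claim_equal_closest_key := by
  intro dd t _
  unfold Spec_closest_key closest_key_alt
  rw [ck_A_eq_fold]
  rw [ck_loop_eq t dd (ckWidth dd) 0 (fun _ _ _ _ => Nat.zero_le _)]
  cases hF : dd.foldl (ckStepB t) none with
  | none => rfl
  | some m =>
    have hw := ck_width_bound dd t m hF
    simp [hw]
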